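-- pv_equiv track=rewrite | github.com/Faiz12002/1_setup_cmax | solver_choice.py | solve_setup_scheduling
-- ===== SOURCE A (Python) =====
-- def solve_setup_scheduling(processing_times, setup_costs, first_task):
--     # Adjust input arrays to handle 1-based indexing
--     p_times = [0] + processing_times
--     s_costs = [[0] * len(setup_costs[0])] + setup_costs
--     s_costs = [([0] + row) for row in s_costs]
--
--     n = len(processing_times)
--     remaining_tasks = set(range(1, n + 1))
--     sequence = [0] * (n + 1)
--
--     # Find the second task with minimal setup cost
--     min_cost = float('inf')
--     second_task = -1
--
--     for j in range(1, n + 1):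
--         if j != first_task:
--             if s_costs[first_task][j] < min_cost:
--                 min_cost = s_costs[first_task][j]
--                 second_task = j
--
--     # Initialize first two tasks
--     sequence[1] = 0  # s_1 = 0
--     current_time = p_times[first_task]
--     sequence[2] = current_time + s_costs[first_task][second_task]
--     current_time = sequence[2] + p_times[second_task]
--
--     # Remove scheduled tasks from remaining set
--     remaining_tasks.remove(first_task)
--     remaining_tasks.remove(second_task)
--
--     # Track the sequence of tasks
--     task_sequence = [first_task, second_task]
--
--     # Step 4-8: Main loop for remaining tasks
--     last_task = second_task
--     current_pos = 3
--
--     while remaining_tasks: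
--         min_setup = float('inf')
--         next_task = -1
--
--         for task in remaining_tasks:
--             if s_costs[last_task][task] < min_setup:
--                 min_setup = s_costs[last_task][task]
--                 next_task = task
--
--         sequence[current_pos] = current_time + s_costs[last_task][next_task]
--         current_time = sequence[current_pos] + p_times[next_task]
--
--         remaining_tasks.remove(next_task)
--         last_task = next_task
--         task_sequence.append(next_task)
--         current_pos += 1
--
--     return sequence[1:], current_time, task_sequence
-- ===== SOURCE B (Python) =====
-- def solve_setup_scheduling(processing_times, setup_costs, first_task):
--     # Sort-based greedy: precompute each task's neighbor list once, sorted by setup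
--     # cost (the stable sort keeps ascending index order on ties), then each step just
--     # takes the first not-yet-used neighbor instead of re-scanning a remaining set
--     # for the minimum.
--     n = len(processing_times)
--     ranked = [[]] + [sorted(range(1, n + 1), key=lambda j: setup_costs[i - 1][j - 1])
--                      for i in range(1, n + 1)]
--     used = [False] * (n + 1)
--     used[first_task] = True
--     order = [first_task]
--     starts = [0]
--     t = processing_times[first_task - 1]
--     last = first_task
--     for _ in range(n - 1):
--         for j in ranked[last]:
--             if not used[j]:
--                 nxt = j
--                 break
--         used[nxt] = True
--         s = t + setup_costs[last - 1][nxt - 1]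
--         starts.append(s)
--         t = s + processing_times[nxt - 1]
--         order.append(nxt)
--         last = nxt
--     return starts, t, order
-- ===== Notes on version B (the rewrite author's own statement) =====
-- stated objective: alternative
-- what changed: A repeatedly scans the remaining-task set for the minimum setup cost at every step; B instead presorts each task's neighbor list by setup cost once (stable sort = index tie-break) and each greedy step just takes the first not-yet-used entry of the current task's presorted list, tracked by a boolean used array.
-- outside the precondition, e.g. on solve_setup_scheduling([1, 1], [[0, 1], [5]], 1): A returns ([0, 2], 3, [1, 2]), B raises IndexError
import Mathlib
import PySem

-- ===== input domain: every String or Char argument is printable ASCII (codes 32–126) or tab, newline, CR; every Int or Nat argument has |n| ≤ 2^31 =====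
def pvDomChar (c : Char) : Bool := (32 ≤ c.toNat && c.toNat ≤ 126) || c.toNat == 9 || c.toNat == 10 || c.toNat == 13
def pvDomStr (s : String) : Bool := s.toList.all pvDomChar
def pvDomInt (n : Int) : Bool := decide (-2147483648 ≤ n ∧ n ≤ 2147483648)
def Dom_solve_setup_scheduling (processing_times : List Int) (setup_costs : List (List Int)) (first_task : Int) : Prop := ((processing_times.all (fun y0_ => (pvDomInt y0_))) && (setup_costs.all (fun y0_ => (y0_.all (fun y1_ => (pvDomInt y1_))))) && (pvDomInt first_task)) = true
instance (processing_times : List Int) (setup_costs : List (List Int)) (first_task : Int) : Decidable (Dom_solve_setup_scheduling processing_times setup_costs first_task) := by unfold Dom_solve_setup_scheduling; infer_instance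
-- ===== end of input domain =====

-- B replaces A's per-step minimum scan over the remaining set by per-task neighbor lists
-- presorted by setup cost once, plus a boolean used array: each step takes the first unused
-- entry of the current task's presorted list.

-- ===== PORT A =====
-- s_costs[i][j] lookup on the padded matrix (IndexError = out of range is excluded by Pre_, getD is never hit there)
def pvCostA (s_costs : List (List Int)) (i j : Int) : Int :=
  PySem.List.pyGetD (PySem.List.pyGetD s_costs i ([] : List Int)) j 0

-- one step of A's strict-< minimum scan (state = (min_cost as Option, best task); none = float('inf'))
def pvAStep (f : Int → Int) (st : Option Int × Int) (task : Int) : Option Int × Int :=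
  match st with
  | (none, _) => (some (f task), task)
  | (some m, b) => if f task < m then (some (f task), task) else (some m, b)

-- A's inner 'for task in remaining_tasks' scan
def pvAFold (f : Int → Int) (cand : List Int) (st : Option Int × Int) : Option Int × Int :=
  cand.foldl (pvAStep f) st

-- A's second-task scan: 'for j in range(1, n+1): if j != first_task: …'
def pvAScan (f : Int → Int) (ft n : Int) : Option Int × Int :=
  (PySem.List.pyRange 1 (n + 1) 1).foldl
    (fun st j => if j ≠ ft then pvAStep f st j else st) (none, -1)

-- A's main while loop (fuel = remaining.length; the set is the ascending list of remaining tasks,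
-- matching CPython's set iteration order for the small ints 1..n)
def pvALoop (p_times : List Int) (s_costs : List (List Int)) :
    Nat → List Int → Int → Int → List Int → List Int → List Int × Int × List Int
  | 0, _, _, cur, seq, tseq => (seq, cur, tseq)
  | _ + 1, [], _, cur, seq, tseq => (seq, cur, tseq)
  | fuel + 1, c :: cs, last, cur, seq, tseq =>
    let nt := (pvAFold (fun t => pvCostA s_costs last t) (c :: cs) (none, -1)).2
    let sp := cur + pvCostA s_costs last nt
    let cur' := sp + PySem.List.pyGetD p_times nt 0
    pvALoop p_times s_costs fuel ((c :: cs).erase nt) nt cur' (seq ++ [sp]) (tseq ++ [nt])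

def solve_setup_scheduling (processing_times : List Int) (setup_costs : List (List Int)) (first_task : Int) : List Int × Int × List Int :=
  let p_times := (0 : Int) :: processing_times
  let s_costs := ((List.replicate (setup_costs.headD []).length (0 : Int)) :: setup_costs).map
    (fun row => (0 : Int) :: row)
  let n : Int := processing_times.length
  let second := (pvAScan (fun j => pvCostA s_costs first_task j) first_task n).2
  let seq2 := PySem.List.pyGetD p_times first_task 0 + pvCostA s_costs first_task second
  let cur2 := seq2 + PySem.List.pyGetD p_times second 0
  let remaining := ((PySem.List.pyRange 1 (n + 1) 1).erase first_task).erase second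
  let r := pvALoop p_times s_costs remaining.length remaining second cur2 [] [first_task, second]
  (0 :: seq2 :: r.1, r.2.1, r.2.2)

-- ===== PORT B =====
-- cost(i, j) = setup_costs[i-1][j-1], 0-based, no padding (in range under Pre_, default never hit)
def pvCostB (sc : List (List Int)) (i j : Int) : Int :=
  PySem.List.pyGetD (PySem.List.pyGetD sc (i - 1) ([] : List Int)) (j - 1) 0

-- used[j] lookup
def pvUget (used : List Bool) (j : Int) : Bool := PySem.List.pyGetD used j false

-- ranked = [[]] + [sorted(range(1, n+1), key=lambda j: setup_costs[i-1][j-1]) for i in 1..n]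
def pvRanked (sc : List (List Int)) (n : Int) : List (List Int) :=
  ([] : List Int) :: (PySem.List.pyRange 1 (n + 1) 1).map
    (fun i => PySem.List.sorted (PySem.List.pyRange 1 (n + 1) 1) (fun j => pvCostB sc i j) false)

-- the 'for _ in range(n-1)' loop, state = (used, t, starts, order, last)
def pvBLoop (pt : List Int) (sc : List (List Int)) (ranked : List (List Int)) :
    Nat → List Bool → Int → List Int → List Int → Int → List Int × Int × List Int
  | 0, _, t, starts, order, _ => (starts, t, order)
  | fuel + 1, used, t, starts, order, last =>
    -- 'for j in ranked[last]: if not used[j]: nxt = j; break' — under Pre_ the break always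
    -- fires, so the -1 default is never used
    let nxt := ((PySem.List.pyGetD ranked last ([] : List Int)).find? (fun j => !pvUget used j)).getD (-1)
    let s := t + pvCostB sc last nxt
    pvBLoop pt sc ranked fuel (PySem.List.pySetD used nxt true)
      (s + PySem.List.pyGetD pt (nxt - 1) 0) (starts ++ [s]) (order ++ [nxt]) nxt

def solve_setup_scheduling_alt (processing_times : List Int) (setup_costs : List (List Int)) (first_task : Int) : List Int × Int × List Int :=
  let n : Int := processing_times.length
  let ranked := pvRanked setup_costs n
  let used := PySem.List.pySetD (List.replicate (processing_times.length + 1) false) first_task true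
  pvBLoop processing_times setup_costs ranked (processing_times.length - 1) used
    (PySem.List.pyGetD processing_times (first_task - 1) 0) [0] [first_task] first_task

-- ===== PRECONDITION & SPEC =====
-- Exactly where the Python A returns: it needs n ≥ 2 tasks (else set.remove raises KeyError),
-- first_task within 1..n (else KeyError/IndexError), and an n×n-covering setup matrix (else
-- IndexError). A can also return when only rows it never reads (e.g. the final task's row)
-- are short, while B's presorting reads every row; this closed-form shape condition is
-- minimally narrower there (see claim.json cites).
def Pre_solve_setup_scheduling (processing_times : List Int) (setup_costs : List (List Int)) (first_task : Int) : Prop :=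
  2 ≤ processing_times.length ∧ 1 ≤ first_task ∧ first_task ≤ (processing_times.length : Int) ∧
  processing_times.length ≤ setup_costs.length ∧
  ∀ row ∈ setup_costs.take processing_times.length, processing_times.length ≤ row.length
instance (processing_times : List Int) (setup_costs : List (List Int)) (first_task : Int) : Decidable (Pre_solve_setup_scheduling processing_times setup_costs first_task) := by unfold Pre_solve_setup_scheduling; infer_instance

def pvWitness_solve_setup_scheduling : List Int × List (List Int) × Int := ([1, 2], [[0, 1], [1, 0]], 1)

def Spec_solve_setup_scheduling (processing_times : List Int) (setup_costs : List (List Int)) (first_task : Int) (out : List Int × Int × List Int) : Prop := out = solve_setup_scheduling_alt processing_times setup_costs first_task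
instance (processing_times : List Int) (setup_costs : List (List Int)) (first_task : Int) (out : List Int × Int × List Int) : Decidable (Spec_solve_setup_scheduling processing_times setup_costs first_task out) := by unfold Spec_solve_setup_scheduling; infer_instance

-- ===== CLAIM (what is proved, stated in full; the proofs are below) =====
def Claim_equal_solve_setup_scheduling : Prop := ∀ (processing_times : List Int) (setup_costs : List (List Int)) (first_task : Int), Dom_solve_setup_scheduling processing_times setup_costs first_task → Pre_solve_setup_scheduling processing_times setup_costs first_task → Spec_solve_setup_scheduling processing_times setup_costs first_task (solve_setup_scheduling processing_times setup_costs first_task)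

-- ===== LEMMAS AND PROOFS =====

-- canonical selection order: strict lexicographic comparison on (cost, task index)
def pvLexLt (key : Int → Int) (a b : Int) : Prop := key a < key b ∨ (key a = key b ∧ a < b)
def pvLexLe (key : Int → Int) (a b : Int) : Prop := key a < key b ∨ (key a = key b ∧ a ≤ b)

-- proof-side recursive forms of the shared greedy skeleton (ordering, then replay)
def pvOrdRec (g : Int → Int → Int) : Nat → List Int → Int → List Int
  | 0, _, _ => []
  | _ + 1, [], _ => []
  | fuel + 1, c :: cs, last =>
    match PySem.List.min? (c :: cs) (fun j => g last j) with
    | none => []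
    | some nxt => nxt :: pvOrdRec g fuel ((c :: cs).erase nxt) nxt

def pvRepRec (p : Int → Int) (g : Int → Int → Int) : Int → Int → List Int → List Int × Int
  | t, _, [] => ([], t)
  | t, prev, c :: rest =>
    let s := t + g prev c
    let r := pvRepRec p g (s + p c) c rest
    (s :: r.1, r.2)

theorem pvLexLe_antisymm (key : Int → Int) (a b : Int)
    (h1 : pvLexLe key a b) (h2 : pvLexLe key b a) : a = b := by
  rcases h1 with h1 | ⟨e1, l1⟩ <;> rcases h2 with h2 | ⟨e2, l2⟩ <;> omega

theorem pyGet?_cons_shift {α : Type} (x : α) (xs : List α) (i : Int) (h : 1 ≤ i) :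
    PySem.List.pyGet? (x :: xs) i = PySem.List.pyGet? xs (i - 1) := by
  simp only [PySem.List.pyGet?, PySem.List.pyIdx?, List.length_cons]
  have h0 : (0:Int) ≤ i := by omega
  have h0' : (0:Int) ≤ i - 1 := by omega
  simp only [if_pos h0, if_pos h0']
  by_cases hlt : i < (xs.length + 1 : Int)
  · have hlt' : i - 1 < (xs.length : Int) := by omega
    rw [if_pos (by exact_mod_cast hlt), if_pos hlt']
    have ht : i.toNat = (i-1).toNat + 1 := by omega
    rw [ht]
    simp
  · have hlt' : ¬ (i - 1 < (xs.length : Int)) := by omega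
    rw [if_neg (by exact_mod_cast hlt), if_neg hlt']
    rfl

theorem pyGetD_cons_shift (x : Int) (xs : List Int) (i : Int) (h : 1 ≤ i) :
    PySem.List.pyGetD (x :: xs) i 0 = PySem.List.pyGetD xs (i - 1) 0 := by
  simp [PySem.List.pyGetD, pyGet?_cons_shift _ _ _ h]

theorem pyGet?_map' {α β : Type} (f : α → β) (xs : List α) (i : Int) :
    PySem.List.pyGet? (xs.map f) i = (PySem.List.pyGet? xs i).map f := by
  simp only [PySem.List.pyGet?, List.length_map]
  cases PySem.List.pyIdx? xs.length i <;> simp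

theorem cost_bridge (sc : List (List Int)) (r0 : Nat) (i j : Int) (hi : 1 ≤ i) (hj : 1 ≤ j) :
    pvCostA (((List.replicate r0 (0 : Int)) :: sc).map (fun row => (0 : Int) :: row)) i j
      = pvCostB sc i j := by
  unfold pvCostA pvCostB
  simp only [PySem.List.pyGetD, pyGet?_map', pyGet?_cons_shift _ _ _ hi]
  cases hrow : PySem.List.pyGet? sc (i - 1) with
  | none => simp [PySem.List.pyGet?, PySem.List.pyIdx?]
  | some row =>
    simp only [Option.map_some, Option.getD_some]
    rw [pyGet?_cons_shift _ _ _ hj]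

theorem step_congr (f g : Int → Int) (x : Int) (h : f x = g x) (st : Option Int × Int) :
    pvAStep f st x = pvAStep g st x := by
  obtain ⟨o, b⟩ := st
  cases o <;> simp [pvAStep, h]

theorem sel_eq (f : Int → Int) : ∀ (cs : List Int) (b : Int),
    ∃ b', List.foldl (fun acc x =>
          match acc with
          | none => some x
          | some m => if f x < f m then some x else some m) (some b) cs = some b' ∧
      List.foldl (pvAStep f) (some (f b), b) cs = (some (f b'), b') := by
  intro cs
  induction cs with
  | nil => intro b; exact ⟨b, rfl, rfl⟩
  | cons c cs ih =>
    intro b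
    by_cases h : f c < f b
    · obtain ⟨b', h1, h2⟩ := ih c
      exact ⟨b', by simpa [h] using h1, by simpa [pvAStep, h] using h2⟩
    · obtain ⟨b', h1, h2⟩ := ih b
      exact ⟨b', by simpa [h] using h1, by simpa [pvAStep, h] using h2⟩

theorem sel_head (f : Int → Int) (c : Int) (cs : List Int) :
    PySem.List.min? (c :: cs) f = some ((pvAFold f (c :: cs) (none, -1)).2) := by
  obtain ⟨b', h1, h2⟩ := sel_eq f cs c
  unfold pvAFold
  simp only [PySem.List.min?, List.foldl_cons]
  have hstep : pvAStep f (none, -1) c = (some (f c), c) := rfl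
  rw [hstep, h2]
  convert h1 using 2
  funext acc x
  cases acc <;> simp

-- min? over a strictly ascending list picks the lexicographic (key, index) minimum
def pvMStep (key : Int → Int) (acc : Option Int) (x : Int) : Option Int :=
  match acc with
  | none => some x
  | some m => if key x < key m then some x else some m

theorem sel_min_aux (key : Int → Int) : ∀ (t : List Int) (b : Int),
    t.Pairwise (· < ·) → (∀ z ∈ t, b < z) →
    ∃ m, List.foldl (pvMStep key) (some b) t = some m ∧
      (m = b ∨ m ∈ t) ∧ pvLexLe key m b ∧ ∀ y ∈ t, pvLexLe key m y := by
  intro t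
  induction t with
  | nil => intro b _ _; exact ⟨b, rfl, Or.inl rfl, Or.inr ⟨rfl, le_refl _⟩, by simp⟩
  | cons c t ih =>
    intro b hp hb
    have hpt : t.Pairwise (· < ·) := hp.of_cons
    have hbc : b < c := hb c (by simp)
    by_cases h : key c < key b
    · obtain ⟨m, h1, h2, h3, h4⟩ := ih c hpt (by
        intro z hz; exact (List.pairwise_cons.mp hp).1 z hz)
      refine ⟨m, by simpa [pvMStep, h] using h1, ?_, ?_, ?_⟩
      · rcases h2 with h2 | h2 <;> simp [h2]
      · rcases h3 with h3 | ⟨e3, l3⟩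
        · exact Or.inl (by omega)
        · exact Or.inl (by omega)
      · intro y hy
        rcases hy with _ | hy
        · exact h3
        · exact h4 y (by assumption)
    · obtain ⟨m, h1, h2, h3, h4⟩ := ih b hpt (fun z hz => hb z (by simp [hz]))
      refine ⟨m, by simpa [pvMStep, h] using h1, ?_, h3, ?_⟩
      · rcases h2 with h2 | h2 <;> simp [h2]
      · intro y hy
        rcases hy with _ | hy
        · -- y = c; key m ≤ key b ≤ key c, and m ≤ b < c on ties
          rcases h3 with h3 | ⟨e3, l3⟩
          · by_cases hc : key m < key c
            · exact Or.inl hc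
            · exact Or.inr ⟨by omega, by omega⟩
          · by_cases hc : key m < key c
            · exact Or.inl hc
            · exact Or.inr ⟨by omega, by omega⟩
        · exact h4 y (by assumption)

theorem sel_min (key : Int → Int) (xs : List Int) (m : Int)
    (hp : xs.Pairwise (· < ·)) (h : PySem.List.min? xs key = some m) :
    m ∈ xs ∧ ∀ y ∈ xs, pvLexLe key m y := by
  cases xs with
  | nil => simp [PySem.List.min?] at h
  | cons c t =>
    obtain ⟨m', h1, h2, h3, h4⟩ := sel_min_aux key t c hp.of_cons
      (fun z hz => (List.pairwise_cons.mp hp).1 z hz)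
    have hkey : PySem.List.min? (c :: t) key = some m' := by
      unfold PySem.List.min?
      rw [List.foldl_cons]
      convert h1 using 2
      funext acc x
      cases acc <;> simp [pvMStep]
    rw [hkey] at h
    obtain rfl : m' = m := by injection h
    constructor
    · rcases h2 with h2 | h2 <;> simp [h2]
    · intro y hy
      rcases hy with _ | hy
      · exact h3
      · exact h4 y (by assumption)

-- inserting an element that came after everything already placed keeps strict lex order
theorem insertBy_pairwise_lexLt (key : Int → Int) : ∀ (acc : List Int) (x : Int),
    acc.Pairwise (pvLexLt key) → (∀ y ∈ acc, y < x) →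
    (PySem.List.insertBy (fun p q => decide (key p < key q)) x acc).Pairwise (pvLexLt key) := by
  intro acc
  induction acc with
  | nil => intro x _ _; simp [PySem.List.insertBy]
  | cons y ys ih =>
    intro x hp hlt
    by_cases h : key x < key y
    · simp only [PySem.List.insertBy, h, decide_true, if_true]
      refine List.pairwise_cons.mpr ⟨?_, hp⟩
      intro z hz
      rcases hz with _ | hz
      · exact Or.inl h
      · have := (List.pairwise_cons.mp hp).1 z (by assumption)
        rcases this with h2 | ⟨e2, l2⟩ <;> exact Or.inl (by omega)
    · simp only [PySem.List.insertBy, h, decide_false]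
      rw [if_neg (by simp)]
      refine List.pairwise_cons.mpr ⟨?_, ih x hp.of_cons (fun z hz => hlt z (by simp [hz]))⟩
      intro z hz
      rw [PySem.List.mem_insertBy] at hz
      rcases hz with rfl | hz
      · -- z = x: key y ≤ key x, and y < x
        by_cases hk : key y < key z
        · exact Or.inl hk
        · exact Or.inr ⟨by omega, hlt y (by simp)⟩
      · exact (List.pairwise_cons.mp hp).1 z hz

theorem foldl_insertBy_pairwise (key : Int → Int) : ∀ (xs acc : List Int),
    xs.Pairwise (· < ·) → acc.Pairwise (pvLexLt key) → (∀ y ∈ acc, ∀ z ∈ xs, y < z) →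
    (xs.foldl (fun acc x => PySem.List.insertBy (fun p q => decide (key p < key q)) x acc) acc).Pairwise
      (pvLexLt key) := by
  intro xs
  induction xs with
  | nil => intro acc _ hacc _; simpa using hacc
  | cons x xs ih =>
    intro acc hp hacc hcross
    simp only [List.foldl_cons]
    refine ih _ hp.of_cons ?_ ?_
    · exact insertBy_pairwise_lexLt key acc x hacc (fun y hy => hcross y hy x (by simp))
    · intro y hy z hz
      rw [PySem.List.mem_insertBy] at hy
      rcases hy with rfl | hy
      · exact (List.pairwise_cons.mp hp).1 z hz
      · exact hcross y hy z (by simp [hz])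

theorem sorted_range_pairwise (key : Int → Int) (a b : Int) :
    (PySem.List.sorted (PySem.List.pyRange a b 1) key false).Pairwise (pvLexLt key) := by
  rw [PySem.List.sorted_eq_foldl_insertBy]
  exact foldl_insertBy_pairwise key _ [] (PySem.List.pairwise_lt_pyRange_one a b)
    (by simp) (by simp)

-- find? on a strictly lex-sorted list returns the lex minimum of the satisfying elements
theorem find_lex (key : Int → Int) (P : Int → Bool) : ∀ (L : List Int) (m : Int),
    L.Pairwise (pvLexLt key) → L.find? P = some m →
    m ∈ L ∧ P m = true ∧ ∀ y ∈ L, P y = true → pvLexLe key m y := by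
  intro L
  induction L with
  | nil => intro m _ h; simp at h
  | cons c t ih =>
    intro m hp hf
    by_cases hc : P c = true
    · rw [List.find?_cons_of_pos hc] at hf
      obtain rfl : c = m := by injection hf
      refine ⟨by simp, hc, ?_⟩
      intro y hy _
      rcases hy with _ | hy
      · exact Or.inr ⟨rfl, le_refl _⟩
      · have := (List.pairwise_cons.mp hp).1 y (by assumption)
        rcases this with h | ⟨e, l⟩
        · exact Or.inl h
        · exact Or.inr ⟨e, by omega⟩
    · rw [List.find?_cons_of_neg hc] at hf
      obtain ⟨h1, h2, h3⟩ := ih m hp.of_cons hf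
      refine ⟨by simp [h1], h2, ?_⟩
      intro y hy hPy
      rcases hy with _ | hy
      · exact absurd hPy hc
      · exact h3 y (by assumption) hPy

-- used-array reads and writes
theorem uget_replicate (k : Nat) (j : Int) (hj : 0 ≤ j) :
    pvUget (List.replicate k false) j = false := by
  unfold pvUget
  simp only [PySem.List.pyGetD, PySem.List.pyGet?, PySem.List.pyIdx?, List.length_replicate,
    if_pos hj]
  split_ifs with h
  · simp
  · rfl

theorem uget_uset (used : List Bool) (v : Bool) (m j : Int) (h0 : 0 ≤ m)
    (hm : m < (used.length : Int)) (hj : 0 ≤ j) :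
    pvUget (PySem.List.pySetD used m v) j = if j = m then v else pvUget used j := by
  unfold pvUget
  rw [PySem.List.pySetD_of_nonneg _ _ h0]
  simp only [PySem.List.pyGetD, PySem.List.pyGet?, PySem.List.pyIdx?, List.length_set,
    if_pos hj]
  by_cases hlt : j < (used.length : Int)
  · rw [if_pos hlt]
    simp only [Option.bind_some]
    rw [List.getElem?_set]
    split_ifs <;> first | rfl | omega
  · rw [if_neg hlt]
    have hne : ¬ (j = m) := by omega
    simp [hne]

-- ranked[last] is the sorted neighbor row of last, for 1 ≤ last ≤ n
theorem ranked_lookup (sc : List (List Int)) (n last : Int) (h1 : 1 ≤ last) (h2 : last ≤ n) :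
    PySem.List.pyGetD (pvRanked sc n) last ([] : List Int)
      = PySem.List.sorted (PySem.List.pyRange 1 (n + 1) 1) (fun j => pvCostB sc last j) false := by
  unfold pvRanked
  simp only [PySem.List.pyGetD]
  rw [pyGet?_cons_shift _ _ _ h1, pyGet?_map']
  have hget : PySem.List.pyGet? (PySem.List.pyRange 1 (n + 1) 1) (last - 1) = some last := by
    simp only [PySem.List.pyGet?, PySem.List.pyIdx?, PySem.List.length_pyRange_one]
    have hlen : ((n + 1 - 1).toNat : Int) = n := by omega
    rw [if_pos (by omega : (0:Int) ≤ last - 1), if_pos (by omega : last - 1 < ((n + 1 - 1).toNat : Int))]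
    have hidx : (last - 1).toNat < (PySem.List.pyRange 1 (n + 1) 1).length := by
      rw [PySem.List.length_pyRange_one]; omega
    rw [Option.bind_some, List.getElem?_eq_getElem hidx, PySem.List.getElem_pyRange_one]
    congr 1
    omega
  rw [hget]
  rfl

-- B's find-first-unused pick equals A's min? pick over the ascending remaining list
theorem pick_eq (sc : List (List Int)) (used : List Bool) (n last m : Int)
    (hrem : PySem.List.min? ((PySem.List.pyRange 1 (n + 1) 1).filter (fun j => !pvUget used j))
        (fun j => pvCostB sc last j) = some m) :
    ((PySem.List.sorted (PySem.List.pyRange 1 (n + 1) 1) (fun j => pvCostB sc last j) false).find?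
        (fun j => !pvUget used j)).getD (-1) = m := by
  set key := fun j => pvCostB sc last j with hkey
  set rng := PySem.List.pyRange 1 (n + 1) 1 with hrng
  set rem := rng.filter (fun j => !pvUget used j) with hremdef
  set L := PySem.List.sorted rng key false with hL
  have hmemL : ∀ x, x ∈ L ↔ x ∈ rng := fun x => PySem.List.mem_sorted rng key false x
  obtain ⟨hmmem, hmin⟩ := sel_min key rem m
    ((PySem.List.pairwise_lt_pyRange_one 1 (n + 1)).filter _) hrem
  have hmrng : m ∈ rng := (List.mem_filter.mp hmmem).1
  have hmP : (!pvUget used m) = true := (List.mem_filter.mp hmmem).2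
  have hsome : (L.find? (fun j => !pvUget used j)).isSome := by
    rw [List.find?_isSome]
    exact ⟨m, (hmemL m).mpr hmrng, hmP⟩
  obtain ⟨m', hm'⟩ := Option.isSome_iff_exists.mp hsome
  obtain ⟨h1, h2, h3⟩ := find_lex key _ L m' (sorted_range_pairwise key 1 (n + 1)) hm'
  have hm'rem : m' ∈ rem := List.mem_filter.mpr ⟨(hmemL m').mp h1, h2⟩
  have : m' = m := pvLexLe_antisymm key m' m
    (h3 m ((hmemL m).mpr hmrng) hmP) (hmin m' hm'rem)
  rw [hm', this]
  rfl

-- marking the pick used removes exactly it from the ascending remaining list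
theorem filter_uset (used : List Bool) (n m : Int) (h0 : 0 ≤ m)
    (hm : m < (used.length : Int)) :
    ((PySem.List.pyRange 1 (n + 1) 1).filter (fun j => !pvUget used j)).erase m
      = (PySem.List.pyRange 1 (n + 1) 1).filter
          (fun j => !pvUget (PySem.List.pySetD used m true) j) := by
  have hnd : ((PySem.List.pyRange 1 (n + 1) 1).filter (fun j => !pvUget used j)).Nodup :=
    (PySem.List.nodup_pyRange_one 1 (n + 1)).filter _
  rw [hnd.erase_eq_filter, List.filter_filter]
  refine List.filter_congr ?_
  intro x hx
  have hx1 : 1 ≤ x := (PySem.List.mem_pyRange_one.mp hx).1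
  rw [uget_uset used true m x h0 hm (by omega)]
  by_cases he : x = m <;> simp [he]

-- B's main loop computes the canonical ordering-and-replay
theorem b_loop_eq (pt : List Int) (sc : List (List Int)) :
    ∀ (fuel : Nat) (used : List Bool) (t last : Int) (starts order : List Int),
      used.length = pt.length + 1 →
      ((PySem.List.pyRange 1 ((pt.length : Int) + 1) 1).filter (fun j => !pvUget used j)).length = fuel →
      1 ≤ last → last ≤ (pt.length : Int) →
      pvBLoop pt sc (pvRanked sc (pt.length : Int)) fuel used t starts order last
        = (starts ++ (pvRepRec (fun x => PySem.List.pyGetD pt (x - 1) 0) (pvCostB sc) t last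
              (pvOrdRec (pvCostB sc) fuel
                ((PySem.List.pyRange 1 ((pt.length : Int) + 1) 1).filter (fun j => !pvUget used j)) last)).1,
           (pvRepRec (fun x => PySem.List.pyGetD pt (x - 1) 0) (pvCostB sc) t last
              (pvOrdRec (pvCostB sc) fuel
                ((PySem.List.pyRange 1 ((pt.length : Int) + 1) 1).filter (fun j => !pvUget used j)) last)).2,
           order ++ pvOrdRec (pvCostB sc) fuel
             ((PySem.List.pyRange 1 ((pt.length : Int) + 1) 1).filter (fun j => !pvUget used j)) last) := by
  intro fuel
  induction fuel with
  | zero =>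
    intro used t last starts order _ hlen _ _
    have : (PySem.List.pyRange 1 ((pt.length : Int) + 1) 1).filter (fun j => !pvUget used j) = [] :=
      List.eq_nil_of_length_eq_zero hlen
    rw [this]; simp [pvBLoop, pvOrdRec, pvRepRec]
  | succ f ih =>
    intro used t last starts order hul hlen h1 h2
    set rem := (PySem.List.pyRange 1 ((pt.length : Int) + 1) 1).filter (fun j => !pvUget used j)
      with hremdef
    obtain ⟨c, cs, hcc⟩ : ∃ c cs, rem = c :: cs := by
      cases hr : rem with
      | nil => rw [hr] at hlen; simp at hlen
      | cons c cs => exact ⟨c, cs, rfl⟩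
    have hne : rem ≠ [] := by rw [hcc]; simp
    obtain ⟨m, hmin⟩ : ∃ m, PySem.List.min? rem (fun j => pvCostB sc last j) = some m := by
      cases hm : PySem.List.min? rem (fun j => pvCostB sc last j) with
      | none => exact absurd ((PySem.List.min?_eq_none_iff _ _).mp hm) hne
      | some m => exact ⟨m, rfl⟩
    have hmmem : m ∈ rem := PySem.List.min?_mem hmin
    have hmrng : m ∈ PySem.List.pyRange 1 ((pt.length : Int) + 1) 1 :=
      (List.mem_filter.mp hmmem).1
    have hm1 : 1 ≤ m := (PySem.List.mem_pyRange_one.mp hmrng).1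
    have hmn : m ≤ (pt.length : Int) := by
      have := (PySem.List.mem_pyRange_one.mp hmrng).2; omega
    show pvBLoop pt sc (pvRanked sc (pt.length : Int)) (f + 1) used t starts order last = _
    rw [pvBLoop]
    rw [ranked_lookup sc _ last h1 h2]
    rw [pick_eq sc used _ last m (by rw [← hremdef]; exact hmin)]
    have hrem' : rem.erase m = (PySem.List.pyRange 1 ((pt.length : Int) + 1) 1).filter
        (fun j => !pvUget (PySem.List.pySetD used m true) j) := by
      rw [hremdef]
      exact filter_uset used _ m (by omega) (by rw [hul]; push_cast; omega)
    have hlen' : ((PySem.List.pyRange 1 ((pt.length : Int) + 1) 1).filter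
        (fun j => !pvUget (PySem.List.pySetD used m true) j)).length = f := by
      rw [← hrem', List.length_erase_of_mem hmmem, hlen]
      omega
    rw [ih (PySem.List.pySetD used m true) _ m _ _
      (by rw [PySem.List.length_pySetD, hul]) hlen' hm1 hmn]
    have hord : pvOrdRec (pvCostB sc) (f + 1) rem last
        = m :: pvOrdRec (pvCostB sc) f
            ((PySem.List.pyRange 1 ((pt.length : Int) + 1) 1).filter
              (fun j => !pvUget (PySem.List.pySetD used m true) j)) m := by
      rw [hcc, pvOrdRec, ← hcc]
      simp only [hmin]
      rw [hrem']
    rw [hremdef] at hord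
    rw [hord]
    simp [pvRepRec]

theorem main_loop (pt : List Int) (sc : List (List Int)) :
    ∀ (fuel : Nat) (rem : List Int) (last cur : Int) (seq tseq : List Int),
      rem.length = fuel → (∀ x ∈ rem, 1 ≤ x) → 1 ≤ last →
      pvALoop ((0 : Int) :: pt)
          (((List.replicate (sc.headD []).length (0 : Int)) :: sc).map (fun row => (0 : Int) :: row))
          fuel rem last cur seq tseq
        = (seq ++ (pvRepRec (fun x => PySem.List.pyGetD pt (x - 1) 0) (pvCostB sc) cur last
              (pvOrdRec (pvCostB sc) fuel rem last)).1,
           (pvRepRec (fun x => PySem.List.pyGetD pt (x - 1) 0) (pvCostB sc) cur last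
              (pvOrdRec (pvCostB sc) fuel rem last)).2,
           tseq ++ pvOrdRec (pvCostB sc) fuel rem last) := by
  intro fuel
  induction fuel with
  | zero =>
    intro rem last cur seq tseq hlen _ _
    have : rem = [] := List.eq_nil_of_length_eq_zero hlen
    subst this
    simp [pvALoop, pvOrdRec, pvRepRec]
  | succ n ih =>
    intro rem last cur seq tseq hlen hmem hlast
    cases rem with
    | nil => simp at hlen
    | cons c cs =>
      have hcong : pvAFold (fun t => pvCostA
            (((List.replicate (sc.headD []).length (0 : Int)) :: sc).map (fun row => (0 : Int) :: row)) last t)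
            (c :: cs) (none, -1)
          = pvAFold (fun t => pvCostB sc last t) (c :: cs) (none, -1) := by
        unfold pvAFold
        refine PySem.List.foldl_congr_mem _ _ _ _ ?_
        intro acc x hx
        exact step_congr _ _ x (cost_bridge sc _ last x hlast (hmem x hx)) acc
      have hmin : PySem.List.min? (c :: cs) (fun j => pvCostB sc last j)
          = some ((pvAFold (fun t => pvCostB sc last t) (c :: cs) (none, -1)).2) :=
        sel_head _ c cs
      set nt := (pvAFold (fun t => pvCostB sc last t) (c :: cs) (none, -1)).2 with hnt
      have hntmem : nt ∈ c :: cs := PySem.List.min?_mem hmin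
      have hnt1 : 1 ≤ nt := hmem nt hntmem
      have hlen' : ((c :: cs).erase nt).length = n := by
        rw [List.length_erase_of_mem hntmem]
        simpa using hlen
      have hmem' : ∀ x ∈ (c :: cs).erase nt, 1 ≤ x :=
        fun x hx => hmem x (List.mem_of_mem_erase hx)
      show pvALoop _ _ (n+1) (c :: cs) last cur seq tseq = _
      rw [pvALoop]
      rw [hcong]
      rw [ih ((c :: cs).erase nt) nt _ _ _ hlen' hmem' hnt1]
      rw [pvOrdRec, hmin]
      simp only [pvRepRec]
      rw [cost_bridge sc _ last nt hlast hnt1, pyGetD_cons_shift _ _ _ hnt1]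
      simp [← hnt]

-- ===== VERDICT (by name: the statement is the Claim_ definition above) =====
theorem solve_setup_scheduling_spec : Claim_equal_solve_setup_scheduling := by
  intro pt sc ft _ hpre
  obtain ⟨hn2, hft1, hftn, -, -⟩ := hpre
  unfold Spec_solve_setup_scheduling
  have hn2' : (2 : Int) ≤ (pt.length : Int) := by exact_mod_cast hn2
  set n : Int := (pt.length : Int) with hn
  set padded := ((List.replicate (sc.headD []).length (0 : Int)) :: sc).map
      (fun row => (0 : Int) :: row) with hpadded
  set rem0 := (PySem.List.pyRange 1 (n + 1) 1).filter (fun j => j ≠ ft) with hrem0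
  have herase : (PySem.List.pyRange 1 (n + 1) 1).erase ft = rem0 := by
    rw [List.Nodup.erase_eq_filter (PySem.List.nodup_pyRange_one 1 (n + 1)), hrem0]
    congr 1
    funext x
    by_cases h : x = ft <;> simp [h]
  have hmemrem0 : ∀ x ∈ rem0, 1 ≤ x := by
    intro x hx
    rw [hrem0, List.mem_filter] at hx
    exact (PySem.List.mem_pyRange_one.mp hx.1).1
  have hne : rem0 ≠ [] := by
    refine List.ne_nil_of_mem (a := if ft = 1 then (2 : Int) else 1) ?_
    rw [hrem0, List.mem_filter]
    refine ⟨PySem.List.mem_pyRange_one.mpr ?_, ?_⟩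
    · split_ifs <;> omega
    · split_ifs with h <;> simp <;> omega
  obtain ⟨c, cs, hcc⟩ := List.exists_cons_of_ne_nil hne
  have hscan : pvAScan (fun j => pvCostA padded ft j) ft n
      = pvAFold (fun j => pvCostA padded ft j) rem0 (none, -1) := by
    unfold pvAScan pvAFold
    rw [hrem0, List.foldl_filter]
    congr 1
    funext st j
    simp
  have hfold : pvAFold (fun j => pvCostA padded ft j) rem0 (none, -1)
      = pvAFold (fun j => pvCostB sc ft j) rem0 (none, -1) := by
    unfold pvAFold
    refine PySem.List.foldl_congr_mem _ _ _ _ ?_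
    intro acc x hx
    exact step_congr _ _ x (cost_bridge sc _ ft x hft1 (hmemrem0 x hx)) acc
  set second := (pvAFold (fun j => pvCostB sc ft j) rem0 (none, -1)).2 with hsecond
  have hmin : PySem.List.min? rem0 (fun j => pvCostB sc ft j) = some second := by
    rw [hsecond, hcc]
    exact sel_head _ c cs
  have hsmem : second ∈ rem0 := PySem.List.min?_mem hmin
  have hs1 : (1 : Int) ≤ second := hmemrem0 second hsmem
  have hmemerase : ∀ x ∈ rem0.erase second, 1 ≤ x :=
    fun x hx => hmemrem0 x (List.mem_of_mem_erase hx)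
  have hlenerase : (rem0.erase second).length = cs.length := by
    rw [List.length_erase_of_mem hsmem, hcc]
    rfl
  have hs2 : PySem.List.pyGetD ((0 : Int) :: pt) ft 0 + pvCostA padded ft second
      = PySem.List.pyGetD pt (ft - 1) 0 + pvCostB sc ft second := by
    rw [pyGetD_cons_shift _ _ _ hft1, hpadded, cost_bridge sc _ ft second hft1 hs1]
  -- A side
  have hA : solve_setup_scheduling pt sc ft
      = ((0 : Int) :: (PySem.List.pyGetD pt (ft - 1) 0 + pvCostB sc ft second)
            :: (pvRepRec (fun x => PySem.List.pyGetD pt (x - 1) 0) (pvCostB sc)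
                 (PySem.List.pyGetD pt (ft - 1) 0 + pvCostB sc ft second
                   + PySem.List.pyGetD pt (second - 1) 0) second
                 (pvOrdRec (pvCostB sc) (rem0.erase second).length (rem0.erase second) second)).1,
         (pvRepRec (fun x => PySem.List.pyGetD pt (x - 1) 0) (pvCostB sc)
                 (PySem.List.pyGetD pt (ft - 1) 0 + pvCostB sc ft second
                   + PySem.List.pyGetD pt (second - 1) 0) second
                 (pvOrdRec (pvCostB sc) (rem0.erase second).length (rem0.erase second) second)).2,
         [ft, second]
           ++ pvOrdRec (pvCostB sc) (rem0.erase second).length (rem0.erase second) second) := by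
    show (let p_times := (0 : Int) :: pt
      let s_costs := ((List.replicate (sc.headD []).length (0 : Int)) :: sc).map
        (fun row => (0 : Int) :: row)
      let nn : Int := pt.length
      let sec := (pvAScan (fun j => pvCostA s_costs ft j) ft nn).2
      let seq2 := PySem.List.pyGetD p_times ft 0 + pvCostA s_costs ft sec
      let cur2 := seq2 + PySem.List.pyGetD p_times sec 0
      let remaining := ((PySem.List.pyRange 1 (nn + 1) 1).erase ft).erase sec
      let r := pvALoop p_times s_costs remaining.length remaining sec cur2 [] [ft, sec]
      ((0 : Int) :: seq2 :: r.1, r.2.1, r.2.2)) = _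
    simp only [← hpadded, ← hn, hscan, hfold, ← hsecond, herase]
    rw [main_loop pt sc _ _ _ _ _ _ rfl hmemerase hs1]
    rw [hs2, pyGetD_cons_shift _ _ _ hs1]
    simp
  -- B side: initial used array marks exactly ft, so the first loop iteration picks 'second'
  set used0 := PySem.List.pySetD (List.replicate (pt.length + 1) false) ft true with hused0
  have hu0len : used0.length = pt.length + 1 := by
    rw [hused0, PySem.List.length_pySetD, List.length_replicate]
  have hu0 : ∀ j : Int, 0 ≤ j → pvUget used0 j = decide (j = ft) := by
    intro j hj
    rw [hused0, uget_uset _ _ _ _ (by omega) (by rw [List.length_replicate]; push_cast; omega) hj]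
    by_cases he : j = ft
    · simp [he]
    · simp [he, uget_replicate _ _ hj]
  have hfilter0 : (PySem.List.pyRange 1 (n + 1) 1).filter (fun j => !pvUget used0 j) = rem0 := by
    rw [hrem0]
    refine List.filter_congr ?_
    intro x hx
    have hx1 : 1 ≤ x := (PySem.List.mem_pyRange_one.mp hx).1
    rw [hu0 x (by omega)]
    by_cases he : x = ft <;> simp [he]
  have hfuel : rem0.length = pt.length - 1 := by
    have hftmem : ft ∈ PySem.List.pyRange 1 (n + 1) 1 :=
      PySem.List.mem_pyRange_one.mpr ⟨hft1, by omega⟩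
    rw [← herase, List.length_erase_of_mem hftmem, PySem.List.length_pyRange_one]
    omega
  have hB : solve_setup_scheduling_alt pt sc ft
      = ([0] ++ (pvRepRec (fun x => PySem.List.pyGetD pt (x - 1) 0) (pvCostB sc)
            (PySem.List.pyGetD pt (ft - 1) 0) ft
            (pvOrdRec (pvCostB sc) rem0.length rem0 ft)).1,
         (pvRepRec (fun x => PySem.List.pyGetD pt (x - 1) 0) (pvCostB sc)
            (PySem.List.pyGetD pt (ft - 1) 0) ft
            (pvOrdRec (pvCostB sc) rem0.length rem0 ft)).2,
         [ft] ++ pvOrdRec (pvCostB sc) rem0.length rem0 ft) := by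
    show pvBLoop pt sc (pvRanked sc n) (pt.length - 1) used0
        (PySem.List.pyGetD pt (ft - 1) 0) [0] [ft] ft = _
    rw [b_loop_eq pt sc (pt.length - 1) used0 _ ft _ _ hu0len
      (by rw [hfilter0, hfuel]) hft1 hftn]
    rw [hfilter0, hfuel]
  rw [hA, hB]
  -- unfold one step of the canonical form on the B side
  have hord1 : pvOrdRec (pvCostB sc) rem0.length rem0 ft
      = second :: pvOrdRec (pvCostB sc) (rem0.erase second).length (rem0.erase second) second := by
    rw [hcc]
    show pvOrdRec (pvCostB sc) (cs.length + 1) (c :: cs) ft = _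
    rw [pvOrdRec, ← hcc]
    simp only [hmin]
    rw [hlenerase]
  rw [hord1]
  simp only [pvRepRec]
  simp
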